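-- pv_equiv track=rewrite | github.com/userdefault13/Aseprite-Mappie | src/tilemap_generator/map_gen_cli.py | route_is_valid
-- ===== SOURCE A (Python) =====
-- Point = tuple[int, int]
--
-- def route_is_valid(route: list[Point], forbidden: set[Point], blocked_paths: set[Point]) -> bool:
--     if len(route) < 2:
--         return False
--     for cell in route:
--         if cell in forbidden:
--             return False
--         if cell in blocked_paths:
--             return False
--     return True
-- ===== SOURCE B (Python) =====
-- # B: inverted traversal — index the route once as a set, then sweep the obstacle
-- # collections asking whether any obstacle lies on the route (no per-cell loop over route).
-- def route_is_valid(route, forbidden, blocked_paths):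
--     cells = set(route)
--     hit = any(p in cells for p in forbidden) or any(p in cells for p in blocked_paths)
--     return len(route) >= 2 and not hit
-- ===== Notes on version B (the rewrite author's own statement) =====
-- stated objective: alternative
-- what changed: Inverts the traversal: instead of looping over route cells testing membership in the obstacle sets, B builds a set index of the route once and sweeps over the obstacle collections testing whether any obstacle lies on the route.
import Mathlib
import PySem

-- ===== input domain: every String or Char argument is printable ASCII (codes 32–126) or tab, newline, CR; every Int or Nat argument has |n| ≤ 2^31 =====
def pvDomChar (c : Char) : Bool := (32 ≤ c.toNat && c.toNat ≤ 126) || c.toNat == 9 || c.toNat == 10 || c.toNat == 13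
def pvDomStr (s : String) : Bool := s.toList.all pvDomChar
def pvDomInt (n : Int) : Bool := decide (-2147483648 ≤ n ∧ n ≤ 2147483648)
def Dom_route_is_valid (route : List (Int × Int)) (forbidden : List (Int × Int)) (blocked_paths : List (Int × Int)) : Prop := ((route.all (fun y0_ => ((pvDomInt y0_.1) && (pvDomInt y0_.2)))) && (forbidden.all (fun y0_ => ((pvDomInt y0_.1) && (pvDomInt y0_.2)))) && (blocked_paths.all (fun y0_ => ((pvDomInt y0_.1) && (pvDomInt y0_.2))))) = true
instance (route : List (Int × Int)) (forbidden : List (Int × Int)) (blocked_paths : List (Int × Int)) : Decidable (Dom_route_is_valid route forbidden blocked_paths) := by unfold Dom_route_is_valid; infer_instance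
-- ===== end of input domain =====

-- B inverts the traversal (indexes the route as a set, sweeps the obstacle collections);
-- equivalence of return values is proved on all inputs (no mutation involved).

-- ===== PORT A =====
-- loop 'for cell in route' with early returns, as structural recursion
def routeLoopA (forbidden : List (Int × Int)) (blocked_paths : List (Int × Int)) : List (Int × Int) → Bool
  | [] => true
  | cell :: rest =>
    if PySem.Set.contains forbidden cell then false
    else if PySem.Set.contains blocked_paths cell then false
    else routeLoopA forbidden blocked_paths rest

def route_is_valid (route : List (Int × Int)) (forbidden : List (Int × Int)) (blocked_paths : List (Int × Int)) : Bool :=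
  if route.length < 2 then false
  else routeLoopA forbidden blocked_paths route

-- ===== PORT B =====
def route_is_valid_alt (route : List (Int × Int)) (forbidden : List (Int × Int)) (blocked_paths : List (Int × Int)) : Bool :=
  let cells := PySem.Set.ofList route
  let hit := forbidden.any (fun p => PySem.Set.contains cells p)
          || blocked_paths.any (fun p => PySem.Set.contains cells p)
  decide (2 ≤ route.length) && !hit

-- ===== PRECONDITION & SPEC =====
def Spec_route_is_valid (route : List (Int × Int)) (forbidden : List (Int × Int)) (blocked_paths : List (Int × Int)) (out : Bool) : Prop := out = route_is_valid_alt route forbidden blocked_paths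
instance (route : List (Int × Int)) (forbidden : List (Int × Int)) (blocked_paths : List (Int × Int)) (out : Bool) : Decidable (Spec_route_is_valid route forbidden blocked_paths out) := by unfold Spec_route_is_valid; infer_instance

-- ===== CLAIM (what is proved, stated in full; the proofs are below) =====
def Claim_equal_route_is_valid : Prop := ∀ (route : List (Int × Int)) (forbidden : List (Int × Int)) (blocked_paths : List (Int × Int)), Dom_route_is_valid route forbidden blocked_paths → Spec_route_is_valid route forbidden blocked_paths (route_is_valid route forbidden blocked_paths)

-- ===== LEMMAS AND PROOFS =====
theorem routeLoopA_iff (forbidden blocked_paths : List (Int × Int)) (route : List (Int × Int)) :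
    routeLoopA forbidden blocked_paths route = true ↔
      ∀ c ∈ route, c ∉ forbidden ∧ c ∉ blocked_paths := by
  induction route with
  | nil => simp [routeLoopA]
  | cons c rest ih =>
    simp only [routeLoopA, List.mem_cons]
    by_cases hf : PySem.Set.contains forbidden c <;>
      by_cases hb : PySem.Set.contains blocked_paths c <;>
      simp_all

-- ===== VERDICT (by name: the statement is the Claim_ definition above) =====
theorem route_is_valid_spec : Claim_equal_route_is_valid := by
  intro route forbidden blocked_paths _
  unfold Spec_route_is_valid route_is_valid route_is_valid_alt
  by_cases h : route.length < 2
  · simp [h, show ¬ (2 ≤ route.length) by omega]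
  · rw [if_neg h, Bool.eq_iff_iff]
    simp only [Bool.and_eq_true, Bool.not_eq_true', Bool.or_eq_false_iff,
      List.any_eq_false, decide_eq_true_eq]
    rw [routeLoopA_iff]
    constructor
    · intro hall
      refine ⟨by omega, ?_, ?_⟩ <;>
        · intro p hp
          simp only [PySem.Set.contains_iff, PySem.Set.mem_ofList]
          intro hpr
          have := hall p hpr
          tauto
    · rintro ⟨-, hf, hb⟩ c hc
      constructor
      · intro hcf
        have := hf c hcf
        simp [PySem.Set.mem_ofList, hc] at this
      · intro hcb
        have := hb c hcb
        simp [PySem.Set.mem_ofList, hc] at this
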